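-- pv_equiv track=rewrite | github.com/upstat-io/sigil-lang | scripts/convert_aot_run.py | convert_run_body
-- ===== SOURCE A (Python) =====
-- def convert_run_body(body: str) -> str:
--     """Convert the body of a run() block: commas to semicolons.
--
--     The last non-empty line's trailing comma is REMOVED (it's the result expression).
--     All other trailing commas become semicolons.
--     """
--     lines = body.split('\n')
--
--     # Find last non-empty line
--     last_nonempty = -1
--     for i in range(len(lines) - 1, -1, -1):
--         if lines[i].strip():
--             last_nonempty = i
--             break
--
--     result = []
--     for i, line in enumerate(lines):
--         stripped = line.rstrip()
--         if i == last_nonempty and stripped.endswith(','):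
--             # Last statement: remove trailing comma (it's the result expression)
--             result.append(stripped[:-1])
--         elif stripped.endswith(',') and i < last_nonempty:
--             # Non-last statement: comma -> semicolon
--             result.append(stripped[:-1] + ';')
--         else:
--             result.append(stripped if stripped else '')
--
--     return '\n'.join(result)
-- ===== SOURCE B (Python) =====
-- def convert_run_body(body: str) -> str:
--     """Single reverse pass: the first non-empty line seen from the end is the
--     result expression (trailing comma dropped); later non-empty lines get
--     trailing commas turned into semicolons; blank lines become ''."""
--     out = []
--     seen = False
--     for line in reversed(body.split('\n')):
--         s = line.rstrip()
--         if s and not seen: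
--             seen = True
--             out.append(s[:-1] if s.endswith(',') else s)
--         elif s.endswith(','):
--             out.append(s[:-1] + ';')
--         else:
--             out.append(s)
--     out.reverse()
--     return '\n'.join(out)
-- ===== Notes on version B (the rewrite author's own statement) =====
-- stated objective: alternative
-- what changed: Replaces A's two passes (a backward index search for the last non-empty line, then a forward enumerate loop comparing each index against it) with a single reverse traversal that carries a seen-result boolean flag and reverses the collected output once.
import Mathlib
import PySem

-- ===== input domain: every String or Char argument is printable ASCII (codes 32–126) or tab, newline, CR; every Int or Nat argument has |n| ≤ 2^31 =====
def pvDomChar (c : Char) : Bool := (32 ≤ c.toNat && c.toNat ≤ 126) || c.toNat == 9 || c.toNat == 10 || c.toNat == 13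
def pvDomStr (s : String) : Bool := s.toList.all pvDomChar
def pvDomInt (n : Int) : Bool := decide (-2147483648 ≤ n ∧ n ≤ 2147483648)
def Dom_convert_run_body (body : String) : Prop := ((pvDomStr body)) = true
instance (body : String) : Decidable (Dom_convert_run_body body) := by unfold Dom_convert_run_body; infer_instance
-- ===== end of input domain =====

-- B fuses A's two passes (backward search for the last non-empty line, then a forward
-- indexed rewrite) into one reverse traversal carrying a seen-result boolean flag;
-- same return value, objective: alternative decomposition.

-- ===== PORT A =====
-- A's backward 'for i in range(len(lines)-1, -1, -1): … break' search
def pvFindLast (lines : List String) : List Int → Int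
  | [] => -1
  | i :: rest =>
      if PySem.Str.strip (PySem.List.pyGetD lines i "") ≠ "" then i
      else pvFindLast lines rest

-- the body of A's 'for i, line in enumerate(lines)' loop (appends to result)
def pvStepA (last : Int) (acc : List String) (p : Int × String) : List String :=
  let stripped := PySem.Str.rstrip p.2
  if p.1 = last ∧ PySem.Str.endswith stripped "," = true then
    acc ++ [PySem.Str.slice stripped none (some (-1))]
  else if PySem.Str.endswith stripped "," = true ∧ p.1 < last then
    acc ++ [PySem.Str.slice stripped none (some (-1)) ++ ";"]
  else
    acc ++ [if stripped ≠ "" then stripped else ""]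

def convert_run_body (body : String) : String :=
  let lines := (PySem.Str.split? body "\n").getD []
  let last_nonempty := pvFindLast lines (PySem.List.pyRange ((lines.length : Int) - 1) (-1) (-1))
  let result := (PySem.List.enumerate lines 0).foldl (pvStepA last_nonempty) []
  PySem.Str.join "\n" result

-- ===== PORT B =====
-- the body of B's single reverse loop: state = (seen-result flag, collected lines)
def pvStepB (st : Bool × List String) (line : String) : Bool × List String :=
  let s := PySem.Str.rstrip line
  if s ≠ "" ∧ st.1 = false then
    (true, st.2 ++ [if PySem.Str.endswith s "," = true
                    then PySem.Str.slice s none (some (-1)) else s])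
  else if PySem.Str.endswith s "," = true then
    (st.1, st.2 ++ [PySem.Str.slice s none (some (-1)) ++ ";"])
  else
    (st.1, st.2 ++ [s])

def convert_run_body_alt (body : String) : String :=
  let out := (((PySem.Str.split? body "\n").getD []).reverse.foldl pvStepB (false, [])).2
  PySem.Str.join "\n" out.reverse

-- ===== PRECONDITION & SPEC =====
def Spec_convert_run_body (body : String) (out : String) : Prop := out = convert_run_body_alt body
instance (body : String) (out : String) : Decidable (Spec_convert_run_body body out) := by unfold Spec_convert_run_body; infer_instance

-- ===== CLAIM (what is proved, stated in full; the proofs are below) =====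
def Claim_equal_convert_run_body : Prop := ∀ (body : String), Dom_convert_run_body body → Spec_convert_run_body body (convert_run_body body)

-- ===== LEMMAS AND PROOFS =====

-- per-line transform of the result line (drop a trailing comma)
def pvRes (line : String) : String :=
  let s := PySem.Str.rstrip line
  if PySem.Str.endswith s "," = true then PySem.Str.slice s none (some (-1)) else s

-- per-line transform of every other line (trailing comma → semicolon)
def pvMid (line : String) : String :=
  let s := PySem.Str.rstrip line
  if PySem.Str.endswith s "," = true then PySem.Str.slice s none (some (-1)) ++ ";" else s

-- the common value of both programs, expressed on the REVERSED line list
def pvProc : List String → List String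
  | [] => []
  | l :: rest =>
      if PySem.Str.rstrip l ≠ "" then pvRes l :: rest.map pvMid
      else pvMid l :: pvProc rest

-- A's per-index branch, as a pure function of (index, line)
def pvFA (last : Int) (p : Int × String) : String :=
  let stripped := PySem.Str.rstrip p.2
  if p.1 = last ∧ PySem.Str.endswith stripped "," = true then
    PySem.Str.slice stripped none (some (-1))
  else if PySem.Str.endswith stripped "," = true ∧ p.1 < last then
    PySem.Str.slice stripped none (some (-1)) ++ ";"
  else if stripped ≠ "" then stripped else ""

theorem pv_ofList_eq_empty (cs : List Char) : String.ofList cs = "" ↔ cs = [] := by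
  constructor
  · intro h; have := congrArg String.toList h; simpa using this
  · intro h; simp [h]

theorem pv_rstrip_nil_iff (cs : List Char) :
    PySem.Chars.rstrip cs = [] ↔ ∀ c ∈ cs, PySem.Chars.isspace c = true := by
  simp [PySem.Chars.rstrip, List.dropWhile_eq_nil_iff]

-- 'line.strip()' is falsy exactly when 'line.rstrip()' is (A tests strip, B tests rstrip)
theorem pv_strip_empty_iff (s : String) :
    PySem.Str.strip s = "" ↔ PySem.Str.rstrip s = "" := by
  simp only [PySem.Str.strip, PySem.Str.rstrip, PySem.Chars.strip, pv_ofList_eq_empty,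
    pv_rstrip_nil_iff]
  constructor
  · intro h c hc
    by_cases hsp : PySem.Chars.isspace c = true
    · exact hsp
    · refine h c ?_
      rcases (List.mem_append).1
          ((List.takeWhile_append_dropWhile (p := PySem.Chars.isspace) (l := s.toList)) ▸ hc)
        with h1 | h2
      · exact absurd (List.mem_takeWhile_imp h1) hsp
      · exact h2
  · intro h c hc
    exact h c ((List.dropWhile_sublist _).mem hc)

theorem pv_endswith_empty : PySem.Str.endswith "" "," = false := by decide

theorem pv_getD_lt (xs : List String) (l : String) (i : Int) (h0 : 0 ≤ i)
    (h : i < (xs.length : Int)) :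
    PySem.List.pyGetD (xs ++ [l]) i "" = PySem.List.pyGetD xs i "" := by
  rw [PySem.List.pyGetD_of_nonneg _ _ h0, PySem.List.pyGetD_of_nonneg _ _ h0]
  have : i.toNat < xs.length := by omega
  simp [List.getD, List.getElem?_append_left this]

theorem pv_getD_append_last (xs : List String) (l : String) :
    PySem.List.pyGetD (xs ++ [l]) (xs.length : Int) "" = l := by
  rw [PySem.List.pyGetD_of_nonneg _ _ (by positivity)]
  simp [List.getD]

theorem pv_findLast_append (xs : List String) (l : String) (idxs : List Int)
    (h : ∀ i ∈ idxs, 0 ≤ i ∧ i < (xs.length : Int)) :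
    pvFindLast (xs ++ [l]) idxs = pvFindLast xs idxs := by
  induction idxs with
  | nil => rfl
  | cons i rest ih =>
    have hi := h i (by simp)
    simp only [pvFindLast, pv_getD_lt xs l i hi.1 hi.2]
    split
    · rfl
    · exact ih (fun j hj => h j (by simp [hj]))

theorem pv_findLast_le (xs : List String) (idxs : List Int) (b : Int)
    (hb : -1 ≤ b) (h : ∀ i ∈ idxs, i ≤ b) : pvFindLast xs idxs ≤ b := by
  induction idxs with
  | nil => exact hb
  | cons i rest ih =>
    simp only [pvFindLast]
    split
    · exact h i (by simp)
    · exact ih (fun j hj => h j (by simp [hj]))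

theorem pv_enumerate_append {α : Type} (xs ys : List α) (s : Int) :
    PySem.List.enumerate (xs ++ ys) s
      = PySem.List.enumerate xs s ++ PySem.List.enumerate ys (s + xs.length) := by
  induction xs generalizing s with
  | nil => simp [PySem.List.enumerate]
  | cons x xs ih =>
    simp [PySem.List.enumerate_cons, ih (s + 1)]
    ring_nf

theorem pv_enumerate_fst_bound {α : Type} (xs : List α) (p : Int × α)
    (hp : p ∈ PySem.List.enumerate xs 0) : 0 ≤ p.1 ∧ p.1 < (xs.length : Int) := by
  have : p.1 ∈ (PySem.List.enumerate xs 0).map (fun q => q.1) := List.mem_map_of_mem hp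
  rw [PySem.List.map_fst_enumerate] at this
  have := PySem.List.mem_pyRange_one.1 (by simpa using this)
  omega

theorem pv_map_snd {α β : Type} (f : α → β) (xs : List α) (s : Int) :
    (PySem.List.enumerate xs s).map (fun p => f p.2) = xs.map f := by
  induction xs generalizing s with
  | nil => rfl
  | cons x xs ih => simp [PySem.List.enumerate_cons, ih]

theorem pvFA_of_lt (last : Int) (p : Int × String) (h : p.1 < last) :
    pvFA last p = pvMid p.2 := by
  have hne : ¬ (p.1 = last) := by omega
  by_cases hE : PySem.Str.endswith (PySem.Str.rstrip p.2) "," = true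
  · show (if _ then _ else _) = _
    rw [if_neg (fun hc => hne hc.1), if_pos ⟨hE, h⟩]
    show _ = (if _ then _ else _)
    rw [if_pos hE]
  · show (if _ then _ else _) = _
    rw [if_neg (fun hc => hE hc.2), if_neg (fun hc => hE hc.1)]
    show _ = (if _ then _ else _)
    rw [if_neg hE]
    by_cases hs : PySem.Str.rstrip p.2 = ""
    · rw [if_neg (fun hc => hc hs)]; exact hs.symm
    · rw [if_pos hs]

theorem pvFA_self (last : Int) (l : String) : pvFA last (last, l) = pvRes l := by
  by_cases hE : PySem.Str.endswith (PySem.Str.rstrip l) "," = true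
  · show (if _ then _ else _) = _
    rw [if_pos ⟨rfl, hE⟩]
    show _ = (if _ then _ else _)
    rw [if_pos hE]
  · show (if _ then _ else _) = _
    rw [if_neg (fun hc => hE hc.2), if_neg (fun hc => hE hc.1)]
    show _ = (if _ then _ else _)
    rw [if_neg hE]
    by_cases hs : PySem.Str.rstrip l = ""
    · rw [if_neg (fun hc => hc hs)]; exact hs.symm
    · rw [if_pos hs]

theorem pv_mid_of_blank (l : String) (h : PySem.Str.rstrip l = "") : pvMid l = "" := by
  show (if _ then _ else _) = _
  rw [h, if_neg (by rw [pv_endswith_empty]; simp)]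

theorem pvFA_of_blank (last i : Int) (l : String) (hne : i ≠ last)
    (h : PySem.Str.rstrip l = "") : pvFA last (i, l) = pvMid l := by
  rw [pv_mid_of_blank l h]
  show (if _ then _ else _) = _
  rw [if_neg (fun hc => hne hc.1)]
  have hE : ¬ PySem.Str.endswith (PySem.Str.rstrip l) "," = true := by
    rw [h, pv_endswith_empty]; simp
  rw [if_neg (fun hc => hE hc.1), if_neg (fun hc => hc h)]

theorem pvStepA_eq (last : Int) (acc : List String) (p : Int × String) :
    pvStepA last acc p = acc ++ [pvFA last p] := by
  by_cases h1 : p.1 = last ∧ PySem.Str.endswith (PySem.Str.rstrip p.2) "," = true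
  · show (if _ then _ else _) = _ ++ [if _ then _ else _]
    rw [if_pos h1, if_pos h1]
  · by_cases h2 : PySem.Str.endswith (PySem.Str.rstrip p.2) "," = true ∧ p.1 < last
    · show (if _ then _ else _) = _ ++ [if _ then _ else _]
      rw [if_neg h1, if_neg h1, if_pos h2, if_pos h2]
    · show (if _ then _ else _) = _ ++ [if _ then _ else _]
      rw [if_neg h1, if_neg h1, if_neg h2, if_neg h2]

theorem pv_afold (last : Int) (E : List (Int × String)) (acc : List String) :
    E.foldl (pvStepA last) acc = acc ++ E.map (pvFA last) := by
  induction E generalizing acc with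
  | nil => simp
  | cons p rest ih =>
    rw [List.foldl_cons, pvStepA_eq, ih]
    simp

theorem pvStepB_true (out : List String) (l : String) :
    pvStepB (true, out) l = (true, out ++ [pvMid l]) := by
  show (if _ then _ else _) = _
  rw [if_neg (by simp)]
  show _ = (_, _ ++ [if _ then _ else _])
  by_cases hE : PySem.Str.endswith (PySem.Str.rstrip l) "," = true
  · rw [if_pos hE, if_pos hE]
  · rw [if_neg hE, if_neg hE]

theorem pvStepB_false_blank (out : List String) (l : String)
    (h : PySem.Str.rstrip l = "") :
    pvStepB (false, out) l = (false, out ++ [pvMid l]) := by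
  rw [pv_mid_of_blank l h]
  show (if _ then _ else _) = _
  rw [if_neg (fun hc => hc.1 h)]
  have hE : ¬ PySem.Str.endswith (PySem.Str.rstrip l) "," = true := by
    rw [h, pv_endswith_empty]; simp
  rw [if_neg hE, h]

theorem pvStepB_false_nonblank (out : List String) (l : String)
    (h : ¬ PySem.Str.rstrip l = "") :
    pvStepB (false, out) l = (true, out ++ [pvRes l]) := by
  show (if _ then _ else _) = (_, _ ++ [if _ then _ else _])
  rw [if_pos ⟨h, rfl⟩]

theorem pv_bfold_true (M : List String) (out : List String) :
    M.foldl pvStepB (true, out) = (true, out ++ M.map pvMid) := by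
  induction M generalizing out with
  | nil => simp
  | cons l rest ih =>
    rw [List.foldl_cons, pvStepB_true, ih]
    simp

theorem pv_bfold_false (M : List String) (out : List String) :
    (M.foldl pvStepB (false, out)).2 = out ++ pvProc M := by
  induction M generalizing out with
  | nil => simp [pvProc]
  | cons l rest ih =>
    by_cases h : PySem.Str.rstrip l = ""
    · rw [List.foldl_cons, pvStepB_false_blank out l h, ih]
      simp [pvProc, h, pv_mid_of_blank l h]
    · rw [List.foldl_cons, pvStepB_false_nonblank out l h, pv_bfold_true]
      simp [pvProc, h]

-- main lemma: A's indexed rewrite over M.reverse equals B's reverse pass on M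
theorem pv_main (M : List String) :
    (PySem.List.enumerate M.reverse 0).map
        (pvFA (pvFindLast M.reverse
          (PySem.List.pyRange ((M.reverse.length : Int) - 1) (-1) (-1))))
      = (pvProc M).reverse := by
  induction M with
  | nil => simp [pvProc]
  | cons l rest ih =>
    have hrev : (l :: rest).reverse = rest.reverse ++ [l] := by simp
    set L' := rest.reverse with hL'
    have hlen : (((l :: rest).reverse).length : Int) - 1 = (L'.length : Int) := by
      simp [hrev]
    have hrange : PySem.List.pyRange ((((l :: rest).reverse).length : Int) - 1) (-1) (-1)
        = (L'.length : Int) :: PySem.List.pyRange ((L'.length : Int) - 1) (-1) (-1) := by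
      rw [hlen, PySem.List.pyRange_neg_one_cons (by omega)]
    have hget : PySem.List.pyGetD ((l :: rest).reverse) ((L'.length : Int)) ""
        = l := by rw [hrev]; exact pv_getD_append_last L' l
    have henum : PySem.List.enumerate ((l :: rest).reverse) 0
        = PySem.List.enumerate L' 0 ++ [((L'.length : Int), l)] := by
      rw [hrev, pv_enumerate_append]
      simp [PySem.List.enumerate]
    by_cases hb : PySem.Str.rstrip l = ""
    · -- the last line is blank: the search skips it, every branch yields ''
      have hstrip : PySem.Str.strip l = "" := (pv_strip_empty_iff l).2 hb
      have hlast : pvFindLast ((l :: rest).reverse)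
          (PySem.List.pyRange ((((l :: rest).reverse).length : Int) - 1) (-1) (-1))
          = pvFindLast L'
              (PySem.List.pyRange ((L'.length : Int) - 1) (-1) (-1)) := by
        rw [hrange]
        show (if _ then _ else _) = _
        rw [hget, if_neg (fun hc => hc hstrip)]
        rw [hrev]
        refine pv_findLast_append L' l _ (fun i hi => ?_)
        have := PySem.List.mem_pyRange_neg_one.1 hi
        omega
      set last' := pvFindLast L' (PySem.List.pyRange ((L'.length : Int) - 1) (-1) (-1))
        with hlast'
      have hlt : last' ≤ (L'.length : Int) - 1 := by
        refine pv_findLast_le _ _ _ (by omega) (fun i hi => ?_)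
        have := PySem.List.mem_pyRange_neg_one.1 hi
        omega
      rw [hlast, henum, List.map_append]
      rw [show pvProc (l :: rest) = pvMid l :: pvProc rest from by
        simp only [pvProc]; rw [if_neg (fun hc => hc hb)]]
      rw [ih]
      simp [pvFA_of_blank last' (L'.length : Int) l (by omega) hb]
    · -- the last line is non-blank: it is the result line
      have hstrip : ¬ PySem.Str.strip l = "" := fun hc => hb ((pv_strip_empty_iff l).1 hc)
      have hlast : pvFindLast ((l :: rest).reverse)
          (PySem.List.pyRange ((((l :: rest).reverse).length : Int) - 1) (-1) (-1))
          = (L'.length : Int) := by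
        rw [hrange]
        show (if _ then _ else _) = _
        rw [hget, if_pos hstrip]
      rw [hlast, henum, List.map_append]
      have hpre : (PySem.List.enumerate L' 0).map (pvFA (L'.length : Int))
          = L'.map pvMid := by
        rw [List.map_congr_left (fun p hp =>
          pvFA_of_lt (L'.length : Int) p (pv_enumerate_fst_bound L' p hp).2)]
        exact pv_map_snd pvMid L' 0
      rw [hpre]
      rw [show pvProc (l :: rest) = pvRes l :: rest.map pvMid from by
        simp only [pvProc]; rw [if_pos hb]]
      simp [pvFA_self, hL', List.map_reverse]

-- ===== VERDICT (by name: the statement is the Claim_ definition above) =====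
theorem convert_run_body_spec : Claim_equal_convert_run_body := by
  intro body _
  show convert_run_body body = convert_run_body_alt body
  simp only [convert_run_body, convert_run_body_alt]
  rw [pv_afold, pv_bfold_false]
  have := pv_main (((PySem.Str.split? body "\n").getD []).reverse)
  rw [List.reverse_reverse] at this
  rw [this]
  simp
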